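-- pv_equiv track=rewrite | github.com/TalkingSandwich/Advent-of-code | 2022/day5/day5.py | makeStacks
-- ===== SOURCE A (Python) =====
-- def makeStacks(crates):
--     crate_numbers = crates.pop()
--     stacks = []
--     for i, line in enumerate(crate_numbers):
--         if crate_numbers[i] != " ":
--             stack = []
--             for k, line in enumerate(crates):
--                 if line[i] != " ":
--                     stack.append(line[i])
--             stack.reverse() # stack gets read backwards so it needs to be reversed
--             stacks.append(stack)
--     return stacks
-- ===== SOURCE B (Python) =====
-- def makeStacks(crates):
--     crate_numbers = crates.pop()
--     stacks = {}
--     for i, c in enumerate(crate_numbers):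
--         if c != " ":
--             stacks[i] = []
--     for row in reversed(crates):
--         for i, c in enumerate(row):
--             if c != " " and i in stacks:
--                 stacks[i].append(c)
--     return list(stacks.values())
-- ===== Notes on version B (the rewrite author's own statement) =====
-- stated objective: alternative
-- what changed: B builds a dict keyed by the non-space column indices of the popped numbers line and fills all stacks in one bottom-up pass that enumerates each row's characters (so no per-stack reverse), instead of A's column-by-column rescans of all rows followed by a reverse of each stack.
import Mathlib
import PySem

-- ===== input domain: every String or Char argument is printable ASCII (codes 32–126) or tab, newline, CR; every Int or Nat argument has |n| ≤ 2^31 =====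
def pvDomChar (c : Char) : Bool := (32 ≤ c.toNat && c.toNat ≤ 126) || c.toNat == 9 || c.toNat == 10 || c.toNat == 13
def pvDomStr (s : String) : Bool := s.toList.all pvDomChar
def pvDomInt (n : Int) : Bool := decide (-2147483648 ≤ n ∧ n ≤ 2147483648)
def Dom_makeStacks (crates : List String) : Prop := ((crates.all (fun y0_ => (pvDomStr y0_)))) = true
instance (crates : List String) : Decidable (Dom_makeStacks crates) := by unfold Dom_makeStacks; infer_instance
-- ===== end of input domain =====

-- B builds a dict keyed by the non-space columns of the popped numbers line and fills all
-- stacks in one bottom-up pass, enumerating each row's characters (no per-stack reverse),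
-- instead of A's column-by-column rescans; same return value. Both Pythons pop the last
-- element off the mutable argument (equivalence proved for the return value).


-- ===== PORT A =====
-- crates.pop() : last element is the numbers line, the rest are the rows (raises on [] → Pre_).
-- line[i] is ported as toList.getD i ' '; under Pre_ every access is in range, so the default
-- ' ' is never the observed value of an in-Pre_ access.
def makeStacks (crates : List String) : List (List String) :=
  let nums := (crates.getLastD "").toList
  let rows := crates.dropLast
  (List.range nums.length).foldl
    (fun sts i =>
      if nums.getD i ' ' != ' ' then
        sts ++ [(rows.foldl
            (fun st line =>
              if line.toList.getD i ' ' != ' ' then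
                st ++ [(line.toList.getD i ' ').toString]
              else st) []).reverse]
      else sts) []

-- ===== PORT B =====
-- a dict column-index → stack, seeded from the numbers line, filled bottom-up by
-- enumerating each row's characters; 'i in stacks' is Dict.contains.
def makeStacks_alt (crates : List String) : List (List String) :=
  let crate_numbers := crates.getLastD ""
  let rows := crates.dropLast
  let stacks0 : PySem.Dict Int (List String) :=
    (PySem.List.enumerate crate_numbers.toList 0).foldl
      (fun d ic => if ic.2 != ' ' then d.insert ic.1 [] else d) PySem.Dict.empty
  let filled :=
    rows.reverse.foldl
      (fun d row =>
        (PySem.List.enumerate row.toList 0).foldl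
          (fun d ic =>
            if ic.2 != ' ' && d.contains ic.1 then
              d.modify ic.1 [] (fun st => st ++ [ic.2.toString])
            else d) d) stacks0
  filled.values

-- ===== PRECONDITION & SPEC =====
-- Exactly where Python A returns: crates nonempty (crates.pop()), and for every non-space
-- column i of the numbers line every row is long enough (otherwise line[i] raises IndexError).
def Pre_makeStacks (crates : List String) : Prop :=
  crates ≠ [] ∧
  ∀ i < (crates.getLastD "").toList.length,
    (crates.getLastD "").toList.getD i ' ' ≠ ' ' →
      ∀ row ∈ crates.dropLast, i < row.toList.length
instance (crates : List String) : Decidable (Pre_makeStacks crates) := by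
  unfold Pre_makeStacks; infer_instance
def pvWitness_makeStacks : List String := ["[A]", " 1 "]
def Spec_makeStacks (crates : List String) (out : List (List String)) : Prop := out = makeStacks_alt crates
instance (crates : List String) (out : List (List String)) : Decidable (Spec_makeStacks crates out) := by unfold Spec_makeStacks; infer_instance

-- ===== CLAIM (what is proved, stated in full; the proofs are below) =====
def Claim_equal_makeStacks : Prop := ∀ (crates : List String), Dom_makeStacks crates → Pre_makeStacks crates → Spec_makeStacks crates (makeStacks crates)

-- ===== LEMMAS AND PROOFS =====

-- the entries a single row contributes to the stack of column k, in B's traversal order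
def pvContrib (cs : List Char) (s k : Int) : List String :=
  ((PySem.List.enumerate cs s).filter (fun ic => ic.2 != ' ' && decide (ic.1 = k))).map
    (fun ic => ic.2.toString)

theorem inner_keys (cs : List Char) (s : Int) (d : PySem.Dict Int (List String)) :
    ((PySem.List.enumerate cs s).foldl
      (fun d ic =>
        if ic.2 != ' ' && d.contains ic.1 then
          d.modify ic.1 [] (fun st => st ++ [ic.2.toString])
        else d) d).keys = d.keys := by
  induction cs generalizing s d with
  | nil => rfl
  | cons c rest ih =>
    rw [PySem.List.enumerate_cons]
    simp only [List.foldl_cons]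
    by_cases h : (c != ' ' && d.contains s) = true
    · rw [if_pos h, ih, PySem.Dict.keys_modify,
        PySem.Dict.keys_insert_of_contains _ _ (by simp only [Bool.and_eq_true] at h; exact h.2)]
    · rw [if_neg h, ih]

theorem contrib_cons (c : Char) (rest : List Char) (s k : Int) :
    pvContrib (c :: rest) s k =
      (if (c != ' ' && decide (s = k)) = true then [c.toString] else []) ++
        pvContrib rest (s + 1) k := by
  simp only [pvContrib, PySem.List.enumerate_cons, List.filter_cons]
  by_cases hh : (c != ' ' && decide (s = k)) = true
  · simp [hh]
  · simp [hh]

theorem inner_getD (cs : List Char) (s : Int) (d : PySem.Dict Int (List String)) (k : Int)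
    (hk : d.contains k = true) :
    ((PySem.List.enumerate cs s).foldl
      (fun d ic =>
        if ic.2 != ' ' && d.contains ic.1 then
          d.modify ic.1 [] (fun st => st ++ [ic.2.toString])
        else d) d).getD k [] = d.getD k [] ++ pvContrib cs s k := by
  induction cs generalizing s d with
  | nil => simp [pvContrib]
  | cons c rest ih =>
    rw [PySem.List.enumerate_cons]
    simp only [List.foldl_cons]
    rw [contrib_cons]
    by_cases h : (c != ' ' && d.contains s) = true
    · rw [if_pos h]
      have hc : (c != ' ') = true := by
        simp only [Bool.and_eq_true] at h; exact h.1
      rw [ih _ _ (by simp [PySem.Dict.contains_modify, hk])]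
      rw [PySem.Dict.getD_modify]
      by_cases hks : k = s
      · subst hks
        simp [hc, List.append_assoc]
      · rw [if_neg hks]
        have hd : (decide (s = k)) = false := by simp [Ne.symm hks]
        simp [hd]
    · rw [if_neg h, ih _ _ hk]
      have hhead : (c != ' ' && decide (s = k)) = false := by
        rcases Bool.and_eq_false_iff.mp (Bool.eq_false_iff.mpr h) with h1 | h2
        · simp [h1]
        · have : s ≠ k := by rintro rfl; simp [hk] at h2
          simp [this]
      simp [hhead]

theorem outer_keys (rows : List String) (d : PySem.Dict Int (List String)) :
    (rows.foldl
      (fun d row =>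
        (PySem.List.enumerate row.toList 0).foldl
          (fun d ic =>
            if ic.2 != ' ' && d.contains ic.1 then
              d.modify ic.1 [] (fun st => st ++ [ic.2.toString])
            else d) d) d).keys = d.keys := by
  induction rows generalizing d with
  | nil => rfl
  | cons r rest ih => rw [List.foldl_cons, ih, inner_keys]

theorem outer_getD (rows : List String) (d : PySem.Dict Int (List String)) (k : Int)
    (hk : d.contains k = true) :
    (rows.foldl
      (fun d row =>
        (PySem.List.enumerate row.toList 0).foldl
          (fun d ic =>
            if ic.2 != ' ' && d.contains ic.1 then
              d.modify ic.1 [] (fun st => st ++ [ic.2.toString])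
            else d) d) d).getD k [] =
      d.getD k [] ++ (rows.map (fun row => pvContrib row.toList 0 k)).flatten := by
  induction rows generalizing d with
  | nil => simp
  | cons r rest ih =>
    rw [List.foldl_cons]
    have hk' : ((PySem.List.enumerate r.toList 0).foldl
        (fun d ic =>
          if ic.2 != ' ' && d.contains ic.1 then
            d.modify ic.1 [] (fun st => st ++ [ic.2.toString])
          else d) d).contains k = true := by
      rw [PySem.Dict.contains_eq_decide_mem_keys, inner_keys,
        ← PySem.Dict.contains_eq_decide_mem_keys]; exact hk
    rw [ih _ hk', inner_getD _ _ _ _ hk]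
    simp [List.append_assoc]

theorem build_items (cs : List Char) (s : Int) (d : PySem.Dict Int (List String))
    (hfresh : ∀ p ∈ PySem.List.enumerate cs s, d.contains p.1 = false) :
    ((PySem.List.enumerate cs s).foldl
      (fun d ic => if ic.2 != ' ' then d.insert ic.1 [] else d) d).items =
      d.items ++
        ((PySem.List.enumerate cs s).filter (fun ic => ic.2 != ' ')).map
          (fun ic => (ic.1, ([] : List String))) := by
  induction cs generalizing s d with
  | nil => simp [PySem.List.enumerate]
  | cons c rest ih =>
    rw [PySem.List.enumerate_cons] at hfresh ⊢
    simp only [List.foldl_cons, List.filter_cons]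
    have hfresh' : ∀ p ∈ PySem.List.enumerate rest (s + 1),
        (if (c != ' ') = true then d.insert s ([] : List String) else d).contains p.1 = false := by
      intro p hp
      obtain ⟨m, hm, rfl⟩ := (PySem.List.mem_enumerate_iff _ _ _).mp hp
      have hne : (s + 1 + (m : Int)) ≠ s := by omega
      have hd := hfresh (s + 1 + (m : Int), rest[m]) (by
        exact List.mem_cons_of_mem _ hp)
      split
      · rw [PySem.Dict.contains_insert]; simp [hne, hd]
      · exact hd
    by_cases h : (c != ' ') = true
    · rw [if_pos h, if_pos h]
      have := ih (s + 1) (d.insert s []) (by simpa [h] using hfresh')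
      rw [this, PySem.Dict.items_insert_of_not_contains _ _
        (hfresh (s, c) (List.mem_cons_self))]
      simp [List.append_assoc]
    · rw [if_neg h, if_neg h]
      have := ih (s + 1) d (by simpa [h] using hfresh')
      rw [this]

theorem flatten_map_ite {α β : Type} (l : List α) (p : α → Bool) (f : α → β) :
    (l.map (fun x => if p x then [f x] else [])).flatten = (l.filter p).map f := by
  induction l with
  | nil => rfl
  | cons x l ih =>
    simp only [List.map_cons, List.flatten_cons, List.filter_cons]
    by_cases h : p x <;> simp [h, ih]

theorem contrib_lt (cs : List Char) (s k : Int) (h : k < s) : pvContrib cs s k = [] := by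
  unfold pvContrib
  rw [List.filter_eq_nil_iff.mpr, List.map_nil]
  intro p hp
  obtain ⟨m, hm, rfl⟩ := (PySem.List.mem_enumerate_iff _ _ _).mp hp
  have : s + (m : Int) ≠ k := by omega
  simp [this]

theorem contrib_at (cs : List Char) (s : Int) (j : Nat) :
    pvContrib cs s (s + (j : Int)) =
      if cs.getD j ' ' != ' ' then [(cs.getD j ' ').toString] else [] := by
  induction cs generalizing s j with
  | nil => simp [pvContrib, PySem.List.enumerate]
  | cons c rest ih =>
    cases j with
    | zero =>
      rw [contrib_cons, contrib_lt _ _ _ (by omega : s + ((0 : Nat) : Int) < s + 1)]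
      simp
    | succ j =>
      rw [contrib_cons]
      have heq : s + ((j + 1 : Nat) : Int) = (s + 1) + (j : Int) := by push_cast; ring
      rw [heq, ih]
      have hne : (decide (s = (s + 1) + (j : Int))) = false := by simp; omega
      simp [hne]

-- the index bridge: B's enumerate-filter over the numbers line is A's range-filter
theorem enumFilter {β : Type} (cs : List Char) (s : Int) (g : Int → β) :
    ((PySem.List.enumerate cs s).filter (fun ic => ic.2 != ' ')).map (fun ic => g ic.1) =
      ((List.range cs.length).filter (fun j => cs.getD j ' ' != ' ')).map
        (fun (j : Nat) => g (s + (j : Int))) := by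
  induction cs generalizing s with
  | nil => simp
  | cons c rest ih =>
    rw [PySem.List.enumerate_cons]
    have hmap : (List.map Nat.succ (List.range rest.length)).filter
        (fun j => (c :: rest).getD j ' ' != ' ') =
        ((List.range rest.length).filter (fun j => rest.getD j ' ' != ' ')).map Nat.succ := by
      rw [List.filter_map]; rfl
    have htail : ((List.range rest.length).filter (fun j => rest.getD j ' ' != ' ')).map
          ((fun (j : Nat) => g (s + (j : Int))) ∘ Nat.succ) =
        ((List.range rest.length).filter (fun j => rest.getD j ' ' != ' ')).map
          (fun (j : Nat) => g ((s + 1) + (j : Int))) := by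
      refine List.map_congr_left (fun j _ => ?_)
      simp only [Function.comp]
      congr 1
      push_cast; ring
    rw [List.length_cons, List.range_succ_eq_map]
    simp only [List.filter_cons]
    by_cases h : (c != ' ') = true
    · rw [if_pos (show ((s, c).2 != ' ') = true from h),
        if_pos (show ((c :: rest).getD 0 ' ' != ' ') = true by simpa using h),
        hmap, List.map_cons, List.map_cons, List.map_map, htail, ih (s + 1)]
      simp
    · rw [if_neg (show ¬ ((s, c).2 != ' ') = true from h),
        if_neg (show ¬ ((c :: rest).getD 0 ' ' != ' ') = true by simpa using h),
        hmap, List.map_map, htail, ih (s + 1)]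

theorem a_eq (crates : List String) :
    makeStacks crates =
      ((List.range (crates.getLastD "").toList.length).filter
          (fun j => (crates.getLastD "").toList.getD j ' ' != ' ')).map
        (fun j =>
          ((crates.dropLast.filter (fun line => line.toList.getD j ' ' != ' ')).map
              (fun line => (line.toList.getD j ' ').toString)).reverse) := by
  simp only [makeStacks]
  simp only [PySem.List.foldl_append_if, List.nil_append]

theorem alt_eq (crates : List String) :
    makeStacks_alt crates =
      ((PySem.List.enumerate (crates.getLastD "").toList 0).filter (fun ic => ic.2 != ' ')).map
        (fun ic =>
          (crates.dropLast.reverse.map (fun row => pvContrib row.toList 0 ic.1)).flatten) := by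
  simp only [makeStacks_alt]
  set cs := (crates.getLastD "").toList with hcs
  set rows := crates.dropLast with hrows
  set d0 := (PySem.List.enumerate cs 0).foldl
      (fun d ic => if ic.2 != ' ' then d.insert ic.1 [] else d)
      (PySem.Dict.empty : PySem.Dict Int (List String)) with hd0
  set filled := rows.reverse.foldl
      (fun d row =>
        (PySem.List.enumerate row.toList 0).foldl
          (fun d ic =>
            if ic.2 != ' ' && d.contains ic.1 then
              d.modify ic.1 [] (fun st => st ++ [ic.2.toString])
            else d) d) d0 with hfilled
  have hitems : d0.items =
      ((PySem.List.enumerate cs 0).filter (fun ic => ic.2 != ' ')).map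
        (fun ic => (ic.1, ([] : List String))) := by
    rw [hd0, build_items cs 0 PySem.Dict.empty (fun p _ => PySem.Dict.contains_empty _)]
    rw [show (PySem.Dict.empty : PySem.Dict Int (List String)).items = [] from rfl,
      List.nil_append]
  have hkeys0 : d0.keys =
      ((PySem.List.enumerate cs 0).filter (fun ic => ic.2 != ' ')).map (fun ic => ic.1) := by
    simp only [PySem.Dict.keys, hitems, List.map_map]
    rfl
  have hnd0 : d0.keys.Nodup := by
    rw [hkeys0]
    have hpl := (PySem.List.pairwise_lt_enumerate cs 0).filter (fun ic => ic.2 != ' ')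
    have hmapped := List.Pairwise.map (fun ic : Int × Char => ic.1)
      (fun a b hab => hab) hpl
    exact hmapped.imp (fun hab => ne_of_lt hab)
  have hkeysF : filled.keys = d0.keys := by rw [hfilled]; exact outer_keys _ _
  have hndF : filled.keys.Nodup := by rw [hkeysF]; exact hnd0
  rw [PySem.Dict.values_eq_map_keys filled hndF ([] : List String), hkeysF, hkeys0,
    List.map_map]
  refine List.map_congr_left (fun ic hic => ?_)
  have hk : d0.contains ic.1 = true := by
    rw [PySem.Dict.contains_eq_decide_mem_keys, hkeys0]
    exact decide_eq_true (List.mem_map_of_mem hic)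
  have hget0 : d0.getD ic.1 [] = [] :=
    PySem.Dict.getD_of_mem_items d0 (hitems ▸ List.mem_map_of_mem hic) hnd0 []
  show filled.getD ic.1 [] = _
  rw [hfilled, outer_getD rows.reverse d0 ic.1 hk, hget0, List.nil_append]

-- ===== VERDICT (by name: the statement is the Claim_ definition above) =====
theorem makeStacks_spec : Claim_equal_makeStacks := by
  intro crates _ _
  show makeStacks crates = makeStacks_alt crates
  rw [a_eq, alt_eq,
    enumFilter (crates.getLastD "").toList 0
      (fun k => (crates.dropLast.reverse.map (fun row => pvContrib row.toList 0 k)).flatten)]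
  refine List.map_congr_left (fun j _ => ?_)
  have hrows : (crates.dropLast.reverse.map
        (fun row => pvContrib row.toList 0 ((0 : Int) + (j : Int)))).flatten =
      (crates.dropLast.reverse.filter (fun line => line.toList.getD j ' ' != ' ')).map
        (fun line => (line.toList.getD j ' ').toString) := by
    rw [List.map_congr_left (fun row _ => contrib_at row.toList 0 j), flatten_map_ite]
  rw [hrows, List.filter_reverse, List.map_reverse]
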